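-- pv_equiv track=rewrite | github.com/gdelpu/test-apm | ci-gates/scripts/a0_intake.py | build_diff_summary
-- ===== SOURCE A (Python) =====
-- def build_diff_summary(changed_files: list[dict], risk_hints: list[str]) -> str:
--     """Build a one-line summary of the changes."""
--     type_counts: dict[str, int] = {}
--     for f in changed_files:
--         type_counts[f["type"]] = type_counts.get(f["type"], 0) + 1
--     parts = [f"{count} {ftype}" for ftype, count in sorted(type_counts.items())]
--     summary = f"Changed files: {', '.join(parts)}."
--     if risk_hints:
--         summary += f" Risk hints: {', '.join(risk_hints)}."
--     return summary
-- ===== SOURCE B (Python) =====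
-- def build_diff_summary(changed_files: list[dict], risk_hints: list[str]) -> str:
--     """Build a one-line summary of the changes (sort-then-group, no count dict)."""
--     rest = sorted(f["type"] for f in changed_files)
--     parts = []
--     while rest:
--         t = rest[0]
--         k = 1
--         while k < len(rest) and rest[k] == t:
--             k += 1
--         parts.append(f"{k} {t}")
--         rest = rest[k:]
--     summary = f"Changed files: {', '.join(parts)}."
--     if risk_hints:
--         summary += f" Risk hints: {', '.join(risk_hints)}."
--     return summary
-- ===== Notes on version B (the rewrite author's own statement) =====
-- stated objective: alternative
-- what changed: Replaces A's hash-accumulate-then-sort (build a type->count dict, then sort its items) by sort-then-group: extract the type list, sort it, and count equal runs in one scan, with no intermediate count dict.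
import Mathlib
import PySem

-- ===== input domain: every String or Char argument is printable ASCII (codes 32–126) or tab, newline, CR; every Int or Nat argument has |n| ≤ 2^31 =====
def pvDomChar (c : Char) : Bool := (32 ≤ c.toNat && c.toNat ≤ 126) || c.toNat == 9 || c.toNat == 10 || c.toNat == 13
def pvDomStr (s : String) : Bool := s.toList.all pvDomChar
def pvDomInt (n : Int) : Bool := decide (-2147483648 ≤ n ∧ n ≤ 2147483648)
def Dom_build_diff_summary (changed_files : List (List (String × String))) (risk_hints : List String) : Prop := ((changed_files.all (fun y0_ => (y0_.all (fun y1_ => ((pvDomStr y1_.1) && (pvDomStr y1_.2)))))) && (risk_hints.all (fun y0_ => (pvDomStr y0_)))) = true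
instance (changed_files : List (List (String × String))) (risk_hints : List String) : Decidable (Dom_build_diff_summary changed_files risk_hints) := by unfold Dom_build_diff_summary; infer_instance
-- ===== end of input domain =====

-- B replaces A's hash-accumulate-then-sort (count dict, then sorted items) by sort-then-group:
-- sort the extracted type list and count equal runs directly; same output, 'alternative' objective.

-- ===== PORT A =====
-- the counting loop: type_counts[f["type"]] = type_counts.get(f["type"], 0) + 1; none = KeyError (excluded by Pre_)
def aCountLoop : List (List (String × String)) → PySem.Dict String Int → Option (PySem.Dict String Int)
  | [], d => some d
  | f :: rest, d =>
    match (PySem.Dict.mk f).get? "type" with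
    | none => none
    | some t => aCountLoop rest (d.insert t (d.getD t 0 + 1))

def build_diff_summary (changed_files : List (List (String × String))) (risk_hints : List String) : String :=
  match aCountLoop changed_files PySem.Dict.empty with
  | none => ""  -- KeyError in Python; Pre_ excludes this
  | some type_counts =>
    let parts := (PySem.List.sorted2 type_counts.items Prod.fst Prod.snd).map
      (fun p => PySem.Int.toStr p.2 ++ " " ++ p.1)
    let summary := "Changed files: " ++ PySem.Str.join ", " parts ++ "."
    if risk_hints.isEmpty then summary
    else summary ++ " Risk hints: " ++ PySem.Str.join ", " risk_hints ++ "."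

-- ===== PORT B =====
-- the generator (f["type"] for f in changed_files); none = KeyError (excluded by Pre_)
def bTypes : List (List (String × String)) → Option (List String)
  | [] => some []
  | f :: rest =>
    match (PySem.Dict.mk f).get? "type" with
    | none => none
    | some t => (bTypes rest).map (t :: ·)

-- the while loop over the sorted list: count the run at the head (k), emit "k t", drop the run
def bGroup : List String → List String
  | [] => []
  | t :: rest =>
    (PySem.Int.toStr (((rest.takeWhile (fun x => x == t)).length : Int) + 1) ++ " " ++ t)
      :: bGroup (rest.dropWhile (fun x => x == t))
termination_by s => s.length
decreasing_by
  simp only [List.length_cons]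
  exact Nat.lt_succ_of_le (List.length_dropWhile_le _ _)

def build_diff_summary_alt (changed_files : List (List (String × String))) (risk_hints : List String) : String :=
  match bTypes changed_files with
  | none => ""  -- KeyError in Python; Pre_ excludes this
  | some ts =>
    let parts := bGroup (PySem.List.sorted ts (fun x => x))
    let summary := "Changed files: " ++ PySem.Str.join ", " parts ++ "."
    if risk_hints.isEmpty then summary
    else summary ++ " Risk hints: " ++ PySem.Str.join ", " risk_hints ++ "."

-- ===== PRECONDITION & SPEC =====
-- Pre_ excludes exactly the inputs on which Python A raises KeyError: a changed file without a "type" key.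
def Pre_build_diff_summary (changed_files : List (List (String × String))) (risk_hints : List String) : Prop :=
  ∀ f ∈ changed_files, (PySem.Dict.mk f).contains "type" = true

instance (changed_files : List (List (String × String))) (risk_hints : List String) : Decidable (Pre_build_diff_summary changed_files risk_hints) := by unfold Pre_build_diff_summary; infer_instance

def pvWitness_build_diff_summary : (List (List (String × String))) × List String :=
  ([[("type", "py"), ("path", "a.py")], [("type", "md")], [("type", "py")]], ["large diff"])

def Spec_build_diff_summary (changed_files : List (List (String × String))) (risk_hints : List String) (out : String) : Prop := out = build_diff_summary_alt changed_files risk_hints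
instance (changed_files : List (List (String × String))) (risk_hints : List String) (out : String) : Decidable (Spec_build_diff_summary changed_files risk_hints out) := by unfold Spec_build_diff_summary; infer_instance

-- ===== CLAIM (what is proved, stated in full; the proofs are below) =====
def Claim_equal_build_diff_summary : Prop := ∀ (changed_files : List (List (String × String))) (risk_hints : List String), Dom_build_diff_summary changed_files risk_hints → Pre_build_diff_summary changed_files risk_hints → Spec_build_diff_summary changed_files risk_hints (build_diff_summary changed_files risk_hints)

-- ===== LEMMAS AND PROOFS =====

-- A's counting loop is B's type extraction followed by the counter fold
theorem aCountLoop_eq_bTypes (cf : List (List (String × String))) (d : PySem.Dict String Int) :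
    aCountLoop cf d = (bTypes cf).map
      (fun ts => ts.foldl (fun d t => d.insert t (d.getD t 0 + 1)) d) := by
  induction cf generalizing d with
  | nil => rfl
  | cons f rest ih =>
    simp only [aCountLoop, bTypes]
    cases (PySem.Dict.mk f).get? "type" with
    | none => rfl
    | some t =>
      simp only [ih, Option.map_map]
      rfl

-- Pre_ makes the extraction succeed
theorem bTypes_isSome (cf : List (List (String × String)))
    (h : ∀ f ∈ cf, (PySem.Dict.mk f).contains "type" = true) :
    ∃ ts, bTypes cf = some ts := by
  induction cf with
  | nil => exact ⟨[], rfl⟩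
  | cons f rest ih =>
    have hc := h f (by simp)
    rw [PySem.Dict.contains_eq_isSome_get?] at hc
    obtain ⟨t, ht⟩ := Option.isSome_iff_exists.mp hc
    obtain ⟨ts, hts⟩ := ih (fun g hg => h g (by simp [hg]))
    exact ⟨t :: ts, by simp [bTypes, ht, hts]⟩


-- insertBy applies its predicate only to the inserted element and accumulator elements
theorem foldl_insertBy_congr {α : Type} (p q : α → α → Bool) (S : List α)
    (h : ∀ a ∈ S, ∀ b ∈ S, p a b = q a b) :
    ∀ (xs acc : List α), (∀ a ∈ xs, a ∈ S) → (∀ a ∈ acc, a ∈ S) →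
    xs.foldl (fun acc x => PySem.List.insertBy p x acc) acc
      = xs.foldl (fun acc x => PySem.List.insertBy q x acc) acc := by
  intro xs
  induction xs with
  | nil => intros; rfl
  | cons x xs ih =>
    intro acc hxs hacc
    simp only [List.foldl_cons]
    have hx : x ∈ S := hxs x (by simp)
    have hins : PySem.List.insertBy p x acc = PySem.List.insertBy q x acc := by
      clear ih
      induction acc with
      | nil => rfl
      | cons y ys ihy =>
        simp only [PySem.List.insertBy, h x hx y (hacc y (by simp))]
        split_ifs with hb
        · rfl
        · simp only [List.cons.injEq, true_and]
          exact ihy (fun z hz => hacc z (by simp [hz]))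
    rw [hins]
    refine ih _ (fun a ha => hxs a (by simp [ha])) ?_
    intro a ha
    rw [PySem.List.mem_insertBy] at ha
    rcases ha with rfl | ha
    · exact hx
    · exact hacc a ha

-- a sorted2 with pairwise-distinct first keys is sorted by the first key
theorem sorted2_eq_sorted_fst (xs : List (String × Int)) (hnd : (xs.map Prod.fst).Nodup) :
    PySem.List.sorted2 xs Prod.fst Prod.snd = PySem.List.sorted xs Prod.fst := by
  have hinj : ∀ a ∈ xs, ∀ b ∈ xs, a.1 = b.1 → a = b := by
    intro a ha b hb hab
    exact List.inj_on_of_nodup_map hnd ha hb hab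
  simp only [PySem.List.sorted2, PySem.List.sorted]
  exact foldl_insertBy_congr _ _ xs
    (by
      intro a ha b hb
      by_cases hfst : a.1 = b.1
      · have : a = b := hinj a ha b hb hfst
        subst this
        simp
      · by_cases hlt : a.1 < b.1
        · simp [hlt]
        · have : b.1 < a.1 := lt_of_le_of_ne (not_lt.mp hlt) (Ne.symm hfst)
          simp [hlt, this])
    xs [] (fun a ha => ha) (by simp)


-- everything after the run at the head of a nondecreasing list is strictly larger
theorem gt_of_mem_dropWhile (t : String) (rest : List String)
    (hpw : List.Pairwise (fun a b => a ≤ b) (t :: rest)) :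
    ∀ x ∈ rest.dropWhile (fun x => x == t), t < x := by
  induction rest with
  | nil => simp
  | cons y ys ih =>
    rw [List.pairwise_cons] at hpw
    obtain ⟨hle, hpw'⟩ := hpw
    by_cases hy : (y == t) = true
    · have hyt : y = t := by simpa using hy
      subst hyt
      rw [List.dropWhile_cons_of_pos (by simp)]
      apply ih
      rw [List.pairwise_cons]
      exact ⟨fun x hx => (List.pairwise_cons.mp hpw').1 x hx, (List.pairwise_cons.mp hpw').2⟩
    · rw [show List.dropWhile (fun x => x == t) (y :: ys) = y :: ys from by simp [hy]]
      intro x hx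
      have hyt : y ≠ t := fun h => hy (by simp [h])
      have hty : t < y := lt_of_le_of_ne (hle y (by simp)) (Ne.symm hyt)
      rcases List.mem_cons.mp hx with rfl | hx
      · exact hty
      · exact lt_of_lt_of_le hty ((List.pairwise_cons.mp hpw').1 x hx)

theorem count_head_sorted (t : String) (rest : List String)
    (hpw : List.Pairwise (fun a b => a ≤ b) (t :: rest)) :
    (t :: rest).count t = (rest.takeWhile (fun x => x == t)).length + 1 := by
  have hsplit := List.takeWhile_append_dropWhile (p := fun x => x == t) (l := rest)
  rw [List.count_cons_self]
  congr 1
  conv_lhs => rw [← hsplit]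
  rw [List.count_append]
  have h1 : (rest.takeWhile (fun x => x == t)).count t
      = (rest.takeWhile (fun x => x == t)).length := by
    rw [List.count_eq_length]
    intro b hb
    exact (eq_of_beq (List.mem_takeWhile_imp (p := fun x => x == t) hb)).symm
  have h2 : (rest.dropWhile (fun x => x == t)).count t = 0 := by
    rw [List.count_eq_zero]
    intro hmem
    exact absurd rfl (ne_of_gt (gt_of_mem_dropWhile t rest hpw t hmem)).symm
  omega

-- the grouping loop on a nondecreasing list lists the sorted distinct types with their multiplicities
theorem bGroup_eq (s : List String) (hpw : List.Pairwise (fun a b => a ≤ b) s) :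
    bGroup s = (PySem.List.sorted (PySem.Set.ofList s) (fun x => x)).map
      (fun k => PySem.Int.toStr ((s.count k : Int)) ++ " " ++ k) := by
  induction s using bGroup.induct with
  | case1 => simp [bGroup, PySem.List.sorted_eq_nil_iff]
  | case2 t rest ih =>
    set b := rest.dropWhile (fun x => x == t) with hb
    have hsplit : rest.takeWhile (fun x => x == t) ++ b = rest :=
      List.takeWhile_append_dropWhile
    have hbsub : b.Sublist rest := List.dropWhile_sublist _
    have hbpw : List.Pairwise (fun a b => a ≤ b) b := ((List.pairwise_cons.mp hpw).2).sublist hbsub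
    have hgt : ∀ x ∈ b, t < x := gt_of_mem_dropWhile t rest hpw
    have hsorted : PySem.List.sorted (PySem.Set.ofList (t :: rest)) (fun x => x)
        = t :: PySem.List.sorted (PySem.Set.ofList b) (fun x => x) := by
      apply PySem.List.sorted_eq_of_perm_of_pairwise_lt
      · apply (List.perm_ext_iff_of_nodup ?_ ?_).mpr
        · intro x
          simp only [List.mem_cons, PySem.List.mem_sorted, PySem.Set.mem_ofList]
          constructor
          · rintro (rfl | hx)
            · exact Or.inl rfl
            · exact Or.inr (hbsub.subset hx)
          · rintro (rfl | hx)
            · exact Or.inl rfl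
            · rw [← hsplit] at hx
              rcases List.mem_append.mp hx with h1 | h2
              · exact Or.inl (eq_of_beq (List.mem_takeWhile_imp (p := fun x => x == t) h1))
              · exact Or.inr h2
        · rw [List.nodup_cons]
          constructor
          · intro hmem
            have : t ∈ b := by simpa [PySem.List.mem_sorted, PySem.Set.mem_ofList] using hmem
            exact absurd rfl (ne_of_gt (hgt t this))
          · exact (PySem.List.sorted_perm _ _ _).nodup_iff.mpr (PySem.Set.nodup_ofList b)
        · exact PySem.Set.nodup_ofList _
      · rw [List.pairwise_cons]
        refine ⟨?_, PySem.List.sorted_ofList_pairwise_lt b⟩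
        intro x hx
        exact hgt x (by simpa [PySem.List.mem_sorted, PySem.Set.mem_ofList] using hx)
    rw [bGroup, hsorted, List.map_cons, ← hb]
    congr 1
    · rw [count_head_sorted t rest hpw]
      push_cast
      ring_nf
    · rw [ih hbpw]
      apply List.map_congr_left
      intro k hk
      have hkb : k ∈ b := by simpa [PySem.List.mem_sorted, PySem.Set.mem_ofList] using hk
      have hkt : k ≠ t := ne_of_gt (hgt k hkb)
      have h0 : (rest.takeWhile (fun x => x == t)).count k = 0 :=
        List.count_eq_zero.mpr
          (fun hmem => hkt (eq_of_beq (List.mem_takeWhile_imp (p := fun x => x == t) hmem)))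
      have hcount : (t :: rest).count k = b.count k := by
        rw [List.count_cons, beq_eq_false_iff_ne.mpr (Ne.symm hkt), ← hsplit, List.count_append, h0]
        simp
      rw [hcount]

-- A's sorted counter items, formatted
theorem partsA (ts : List String) :
    (PySem.List.sorted2 (PySem.Dict.counter ts).items Prod.fst Prod.snd).map
      (fun p => PySem.Int.toStr p.2 ++ " " ++ p.1)
    = (PySem.List.sorted (PySem.Set.ofList ts) (fun x => x)).map
      (fun k => PySem.Int.toStr ((ts.count k : Int)) ++ " " ++ k) := by
  rw [PySem.Dict.items_counter]
  set g : String → String × Int := fun k => (k, (ts.count k : Int)) with hg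
  have hnd : (((PySem.Set.ofList ts).map g).map Prod.fst).Nodup := by
    rw [List.map_map]
    have : (Prod.fst ∘ g) = id := by funext k; rfl
    rw [this, List.map_id]
    exact PySem.Set.nodup_ofList ts
  rw [sorted2_eq_sorted_fst _ hnd]
  have hsval : PySem.List.sorted ((PySem.Set.ofList ts).map g) Prod.fst
      = (PySem.List.sorted (PySem.Set.ofList ts) (fun x => x)).map g := by
    apply PySem.List.sorted_eq_of_perm_of_pairwise_lt
    · exact (PySem.List.sorted_perm _ _ _).map g
    · refine List.Pairwise.map g ?_ (PySem.List.sorted_ofList_pairwise_lt ts)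
      intro a b hab
      exact hab
  rw [hsval, List.map_map]
  rfl


-- B's grouped parts are the same sorted distinct types with the same counts
theorem partsB (ts : List String) :
    bGroup (PySem.List.sorted ts (fun x => x))
    = (PySem.List.sorted (PySem.Set.ofList ts) (fun x => x)).map
      (fun k => PySem.Int.toStr ((ts.count k : Int)) ++ " " ++ k) := by
  rw [bGroup_eq _ (PySem.List.sorted_pairwise ts (fun x => x))]
  have hset : PySem.List.sorted (PySem.Set.ofList (PySem.List.sorted ts (fun x => x))) (fun x => x)
      = PySem.List.sorted (PySem.Set.ofList ts) (fun x => x) := by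
    apply PySem.List.sorted_eq_sorted_of_perm _ _ _ (fun a b h => h)
    apply (List.perm_ext_iff_of_nodup (PySem.Set.nodup_ofList _) (PySem.Set.nodup_ofList _)).mpr
    intro x
    simp [PySem.Set.mem_ofList, PySem.List.mem_sorted]
  rw [hset]
  apply List.map_congr_left
  intro k hk
  rw [(PySem.List.sorted_perm ts (fun x => x) false).count_eq]

-- ===== VERDICT (by name: the statement is the Claim_ definition above) =====
theorem build_diff_summary_spec : Claim_equal_build_diff_summary := by
  intro cf rh _hdom hpre
  unfold Spec_build_diff_summary build_diff_summary build_diff_summary_alt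
  obtain ⟨ts, hts⟩ := bTypes_isSome cf hpre
  rw [aCountLoop_eq_bTypes, hts]
  simp only [Option.map_some]
  rw [PySem.Dict.foldl_insert_getD_add_one_eq_counter, partsA, partsB]
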